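-- pv_equiv track=rewrite | github.com/VITAMIN-organisation/vitamin-model-checker | model_checker/algorithms/explicit/NatATL/Recall/witness_parser.py | _split_groups_by_star
-- ===== SOURCE A (Python) =====
-- def _split_groups_by_star(pattern: str) -> list:
--     """
--     Split pattern into groups separated by '*' or '.' operators.
--
--     Args:
--         pattern: Regex pattern string
--
--     Returns:
--         List of pattern groups, with '*' preserved in group strings
--     """
--     groups = []
--     buffer = []
--     for char in pattern:
--         if char == "*" or char == ".":
--             if char == "*":
--                 if buffer:
--                     groups.append("".join(buffer) + "*")
--                     buffer = []
--             else:
--                 if buffer: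
--                     groups.append("".join(buffer))
--                     buffer = []
--         else:
--             buffer.append(char)
--     if buffer:
--         groups.append("".join(buffer))
--     return groups
-- ===== SOURCE B (Python) =====
-- def _split_groups_by_star(pattern: str) -> list:
--     """Split pattern into groups separated by '*' or '.', keeping '*' in groups.
--
--     Run-scanner: instead of buffering character by character, jump over each
--     maximal run of non-delimiter characters and slice it out in one step,
--     attaching a single following '*' if present.
--     """
--     groups = []
--     i = 0
--     n = len(pattern)
--     while i < n:
--         if pattern[i] in "*.":
--             i += 1
--         else:
--             j = i + 1
--             while j < n and pattern[j] not in "*.":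
--                 j += 1
--             if j < n and pattern[j] == "*":
--                 groups.append(pattern[i:j + 1])
--                 i = j + 1
--             else:
--                 groups.append(pattern[i:j])
--                 i = j
--     return groups
-- ===== Notes on version B (the rewrite author's own statement) =====
-- stated objective: alternative
-- what changed: Replaces A's character-by-character buffer/flush state machine with a run-scanner that skips delimiters and slices out each maximal non-delimiter run (plus one optional trailing '*') in a single step.
import Mathlib
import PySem

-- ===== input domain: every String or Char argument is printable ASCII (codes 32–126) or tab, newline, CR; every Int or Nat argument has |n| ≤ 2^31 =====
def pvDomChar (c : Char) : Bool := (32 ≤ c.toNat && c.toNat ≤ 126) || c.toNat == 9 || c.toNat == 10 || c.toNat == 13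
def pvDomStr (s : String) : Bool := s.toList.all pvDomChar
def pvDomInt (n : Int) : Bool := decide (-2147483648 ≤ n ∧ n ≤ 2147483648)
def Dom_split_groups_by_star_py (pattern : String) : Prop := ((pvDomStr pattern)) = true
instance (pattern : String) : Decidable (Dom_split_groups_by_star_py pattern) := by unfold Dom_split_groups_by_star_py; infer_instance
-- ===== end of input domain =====

-- B replaces A's char-by-char buffer/flush state machine with a run-scanner that
-- slices out each maximal non-delimiter run (plus one optional '*') at once (objective: alternative).

-- ===== PORT A =====
-- Python A's loop over `pattern`, state = (groups, buffer); buffer is a List Char,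
-- "".join(buffer) + "*" is ported exactly as String.mk (buffer ++ ['*']).
def pvLoopA : List Char → List String → List Char → List String
  | [], groups, buffer =>
      if buffer.isEmpty then groups else groups ++ [String.mk buffer]
  | c :: rest, groups, buffer =>
      if c = '*' ∨ c = '.' then
        if c = '*' then
          if buffer.isEmpty then pvLoopA rest groups buffer
          else pvLoopA rest (groups ++ [String.mk (buffer ++ ['*'])]) []
        else
          if buffer.isEmpty then pvLoopA rest groups buffer
          else pvLoopA rest (groups ++ [String.mk buffer]) []
      else pvLoopA rest groups (buffer ++ [c])

def split_groups_by_star_py (pattern : String) : List String :=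
  pvLoopA pattern.toList [] []

-- ===== PORT B =====
-- B's run-scanner: skip a delimiter, or take the maximal run of non-delimiters
-- (pattern[i:j] via takeWhile/dropWhile = the inner `while j < n` scan) with one optional '*'.
def pvNd (c : Char) : Bool := !(c = '*' || c = '.')

def pvScanB : List Char → List String
  | [] => []
  | c :: rest =>
      if c = '*' ∨ c = '.' then pvScanB rest
      else
        -- j = end of run: rest.takeWhile pvNd is pattern[i+1:j], rest.dropWhile pvNd starts at j
        let rest' := rest.dropWhile pvNd
        if rest'.head? = some '*' then
          String.mk (c :: rest.takeWhile pvNd ++ ['*']) :: pvScanB rest'.tail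
        else
          String.mk (c :: rest.takeWhile pvNd) :: pvScanB rest'
  termination_by cs => cs.length
  decreasing_by
    · simp
    · have h1 := List.length_dropWhile_le (p := pvNd) (l := rest)
      have h2 := List.length_tail (l := rest.dropWhile pvNd)
      simp only [List.length_cons]
      omega
    · have h1 := List.length_dropWhile_le (p := pvNd) (l := rest)
      simp only [List.length_cons]
      omega

def split_groups_by_star_py_alt (pattern : String) : List String :=
  pvScanB pattern.toList

-- ===== PRECONDITION & SPEC =====
def Spec_split_groups_by_star_py (pattern : String) (out : List String) : Prop := out = split_groups_by_star_py_alt pattern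
instance (pattern : String) (out : List String) : Decidable (Spec_split_groups_by_star_py pattern out) := by unfold Spec_split_groups_by_star_py; infer_instance

-- ===== CLAIM (what is proved, stated in full; the proofs are below) =====
def Claim_equal_split_groups_by_star_py : Prop := ∀ (pattern : String), Dom_split_groups_by_star_py pattern → Spec_split_groups_by_star_py pattern (split_groups_by_star_py pattern)

-- ===== LEMMAS AND PROOFS =====

lemma pvLoopA_append (cs : List Char) : ∀ (g : List String) (b : List Char),
    pvLoopA cs g b = g ++ pvLoopA cs [] b := by
  induction cs with
  | nil =>
    intro g b
    by_cases hb : b.isEmpty <;> simp [pvLoopA, hb]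
  | cons c rest ih =>
    intro g b
    simp only [pvLoopA]
    split_ifs <;>
      first
        | exact ih g b
        | exact ih g (b ++ [c])
        | ((conv_lhs => rw [ih]); (conv_rhs => rw [ih]); simp)

lemma pvLoopA_skip (rest : List Char) : pvLoopA ('.' :: rest) [] [] = pvLoopA rest [] [] := by
  simp only [pvLoopA]
  norm_num

lemma pvLoopA_main (cs : List Char) : ∀ (b : List Char), b ≠ [] →
    pvLoopA cs [] b =
      (if (cs.dropWhile pvNd).head? = some '*' then
        String.mk (b ++ cs.takeWhile pvNd ++ ['*']) :: pvLoopA (cs.dropWhile pvNd).tail [] []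
      else
        String.mk (b ++ cs.takeWhile pvNd) :: pvLoopA (cs.dropWhile pvNd) [] []) := by
  induction cs with
  | nil =>
    intro b hb
    simp [pvLoopA, List.isEmpty_iff, hb]
  | cons c rest ih =>
    intro b hb
    have hbe : b.isEmpty = false := by simp [List.isEmpty_iff, hb]
    by_cases hc : c = '*' ∨ c = '.'
    · have hnd : pvNd c = false := by
        rcases hc with hc | hc <;> simp [pvNd, hc]
      rcases hc with hc | hc <;> subst hc
      · -- '*' : A flushes buffer with a star appended
        simp only [pvLoopA, hbe, Bool.false_eq_true, List.nil_append]
        rw [pvLoopA_append rest [String.mk (b ++ ['*'])] []]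
        simp [List.dropWhile_cons, List.takeWhile_cons, hnd]
      · -- '.' : A flushes buffer without a star
        have hne : ¬ ('.' : Char) = '*' := by decide
        simp only [pvLoopA, hbe, Bool.false_eq_true, List.nil_append]
        rw [pvLoopA_append rest [String.mk b] []]
        simp [List.takeWhile_cons, hnd, pvLoopA_skip]
    · have hnd : pvNd c = true := by
        push_neg at hc
        simp only [pvNd, hc.1, hc.2, decide_false, Bool.or_false, Bool.not_false]
      simp only [pvLoopA, if_neg hc]
      rw [ih (b ++ [c]) (by simp)]
      simp [List.takeWhile_cons, hnd]

lemma pvLoopA_eq_pvScanB (cs : List Char) : pvLoopA cs [] [] = pvScanB cs := by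
  induction hn : cs.length using Nat.strong_induction_on generalizing cs with
  | _ n ih =>
  subst hn
  match cs with
  | [] => simp [pvLoopA, pvScanB]
  | c :: rest =>
    by_cases hc : c = '*' ∨ c = '.'
    · have hA : pvLoopA (c :: rest) [] [] = pvLoopA rest [] [] := by
        rcases hc with hc | hc <;> subst hc <;> simp [pvLoopA]
      rw [hA, pvScanB, if_pos hc]
      exact ih rest.length (by simp) rest rfl
    · rw [pvScanB]
      simp only [if_neg hc]
      have hA : pvLoopA (c :: rest) [] [] = pvLoopA rest [] [c] := by
        simp [pvLoopA, hc]
      rw [hA, pvLoopA_main rest [c] (by simp)]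
      have hlen := List.length_dropWhile_le (p := pvNd) (l := rest)
      by_cases hh : (rest.dropWhile pvNd).head? = some '*'
      · have hne : rest.dropWhile pvNd ≠ [] := by
          intro h; rw [h] at hh; simp at hh
        have ht : (rest.dropWhile pvNd).tail.length < (c :: rest).length := by
          have h2 := List.length_tail (l := rest.dropWhile pvNd)
          simp only [List.length_cons] at *
          omega
        rw [if_pos hh, if_pos hh, ih _ ht _ rfl]
        simp
      · rw [if_neg hh, if_neg hh,
          ih (rest.dropWhile pvNd).length (by simp only [List.length_cons]; omega) _ rfl]
        simp

-- ===== VERDICT (by name: the statement is the Claim_ definition above) =====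
theorem split_groups_by_star_py_spec : Claim_equal_split_groups_by_star_py := by
  intro pattern _
  unfold Spec_split_groups_by_star_py split_groups_by_star_py split_groups_by_star_py_alt
  exact pvLoopA_eq_pvScanB pattern.toList
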